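-- pv_equiv track=rewrite | github.com/temunobe/ai_threat_intelligence | threat_analyzer.py | get_cluster_representatives
-- ===== SOURCE A (Python) =====
-- from typing import List, Dict
--
-- def get_cluster_representatives(threat_texts: List[str],
--                                labels: List[int]) -> Dict[int, str]:
--     """Get representative text for each cluster"""
--     representatives = {}
--
--     for cluster_id in set(labels):
--         if cluster_id == -1:  # Skip noise
--             continue
--
--         # Get texts in this cluster
--         cluster_texts = [text for text, label in zip(threat_texts, labels)
--                        if label == cluster_id]
--
--         # Use the longest text as representative (or implement better selection)
--         representatives[cluster_id] = max(cluster_texts, key=len)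
--
--     return representatives
-- ===== SOURCE B (Python) =====
-- def get_cluster_representatives(threat_texts, labels):
--     """One pass over zip(threat_texts, labels): keep the longest text seen so far
--     per non-noise label (strict > keeps the earliest on ties)."""
--     best = {}
--     for text, label in zip(threat_texts, labels):
--         if label == -1:
--             continue
--         cur = best.get(label)
--         if cur is None or len(text) > len(cur):
--             best[label] = text
--     return best
-- ===== Notes on version B (the rewrite author's own statement) =====
-- stated objective: faster
-- what changed: A loops over each distinct label and rescans the whole zipped text/label list to collect that cluster and take max(key=len); B makes a single pass over zip(threat_texts, labels), keeping per non-noise label the longest text seen so far in a dict (strict > preserves A's earliest-index tie-break).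
-- outside the precondition, e.g. on get_cluster_representatives(['a'], [0, 1]): A raises ValueError, B returns {0: 'a'}
-- crash fix: When some label != -1 occurs only at positions beyond len(threat_texts) (zip truncates), A raises ValueError from max() on the empty cluster; B returns the dict built from the truncated zip. — e.g. on get_cluster_representatives(["a"], [0, 1]): A raises ValueError, B returns [(0, "a")]
import Mathlib
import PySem

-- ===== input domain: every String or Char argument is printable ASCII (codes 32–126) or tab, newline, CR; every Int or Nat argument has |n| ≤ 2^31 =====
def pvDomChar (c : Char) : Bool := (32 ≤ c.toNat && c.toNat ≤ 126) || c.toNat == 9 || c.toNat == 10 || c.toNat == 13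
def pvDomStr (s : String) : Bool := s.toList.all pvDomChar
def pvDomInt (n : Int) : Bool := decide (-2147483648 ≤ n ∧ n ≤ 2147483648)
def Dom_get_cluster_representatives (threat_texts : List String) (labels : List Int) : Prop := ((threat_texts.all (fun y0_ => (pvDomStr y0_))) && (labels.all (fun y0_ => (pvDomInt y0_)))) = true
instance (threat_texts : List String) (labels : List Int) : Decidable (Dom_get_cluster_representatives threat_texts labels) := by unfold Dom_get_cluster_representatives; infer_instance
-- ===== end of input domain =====

-- B replaces A's per-distinct-label rescan of the whole zipped list (O(k·n)) by a single
-- pass that keeps the current longest text per non-noise label in a dict (O(n) dict ops).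

-- ===== PORT A =====
-- loop body of A's 'for cluster_id in set(labels)' loop
def aStep (threat_texts : List String) (labels : List Int)
    (representatives : PySem.Dict Int String) (cluster_id : Int) : PySem.Dict Int String :=
  if cluster_id = -1 then representatives   -- skip noise
  else
    let cluster_texts := ((threat_texts.zip labels).filter (fun tl => tl.2 == cluster_id)).map Prod.fst
    match PySem.List.max? cluster_texts PySem.Str.len with   -- max(cluster_texts, key=len); none = ValueError, excluded by Pre_
    | some m => representatives.insert cluster_id m
    | none => representatives

def get_cluster_representatives (threat_texts : List String) (labels : List Int) : List (Int × String) :=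
  ((PySem.Set.ofList labels).foldl (aStep threat_texts labels) PySem.Dict.empty).items

-- ===== PORT B =====
-- loop body of B's single pass over zip(threat_texts, labels)
def altStep (best : PySem.Dict Int String) (tl : String × Int) : PySem.Dict Int String :=
  if tl.2 = -1 then best
  else
    match best.get? tl.2 with
    | none => best.insert tl.2 tl.1
    | some cur => if PySem.Str.len cur < PySem.Str.len tl.1 then best.insert tl.2 tl.1 else best

def get_cluster_representatives_alt (threat_texts : List String) (labels : List Int) : List (Int × String) :=
  ((threat_texts.zip labels).foldl altStep PySem.Dict.empty).items

-- ===== PRECONDITION & SPEC =====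
-- Pre_ excludes exactly the inputs where A raises ValueError: a non-noise label occurring only
-- beyond len(threat_texts) has an empty cluster (zip truncates), and max([]) raises.
def Pre_get_cluster_representatives (threat_texts : List String) (labels : List Int) : Prop :=
  ∀ x ∈ labels.drop threat_texts.length, x ≠ -1 → x ∈ labels.take threat_texts.length
instance (threat_texts : List String) (labels : List Int) : Decidable (Pre_get_cluster_representatives threat_texts labels) := by unfold Pre_get_cluster_representatives; infer_instance

def pvWitness_get_cluster_representatives : List String × List Int := (["ab", "c"], [0, 0])

-- On inputs with a non-noise label only beyond len(threat_texts), A raises ValueError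
-- (max of the empty cluster) while B returns the dict built from the truncated zip.
def Raises_get_cluster_representatives (threat_texts : List String) (labels : List Int) : Prop :=
  ∃ x ∈ labels.drop threat_texts.length, x ≠ -1 ∧ x ∉ labels.take threat_texts.length
instance (threat_texts : List String) (labels : List Int) : Decidable (Raises_get_cluster_representatives threat_texts labels) := by unfold Raises_get_cluster_representatives; infer_instance
def pvRaiseWitness_get_cluster_representatives : List String × List Int := (["a"], [0, 1])
def pvRaiseWitnessOut_get_cluster_representatives : List (Int × String) := [(0, "a")]

def Spec_get_cluster_representatives (threat_texts : List String) (labels : List Int) (out : List (Int × String)) : Prop := out = get_cluster_representatives_alt threat_texts labels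
instance (threat_texts : List String) (labels : List Int) (out : List (Int × String)) : Decidable (Spec_get_cluster_representatives threat_texts labels out) := by unfold Spec_get_cluster_representatives; infer_instance

-- ===== CLAIM (what is proved, stated in full; the proofs are below) =====
def Claim_equal_get_cluster_representatives : Prop := ∀ (threat_texts : List String) (labels : List Int), Dom_get_cluster_representatives threat_texts labels → Pre_get_cluster_representatives threat_texts labels → Spec_get_cluster_representatives threat_texts labels (get_cluster_representatives threat_texts labels)
def Claim_raises_get_cluster_representatives : Prop := (∀ (threat_texts : List String) (labels : List Int), Dom_get_cluster_representatives threat_texts labels → Raises_get_cluster_representatives threat_texts labels → ¬ Pre_get_cluster_representatives threat_texts labels) ∧ (Dom_get_cluster_representatives (pvRaiseWitness_get_cluster_representatives.1) (pvRaiseWitness_get_cluster_representatives.2) ∧ Raises_get_cluster_representatives (pvRaiseWitness_get_cluster_representatives.1) (pvRaiseWitness_get_cluster_representatives.2) ∧ get_cluster_representatives_alt (pvRaiseWitness_get_cluster_representatives.1) (pvRaiseWitness_get_cluster_representatives.2) = pvRaiseWitnessOut_get_cluster_representatives)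

-- ===== LEMMAS AND PROOFS =====

-- proof-side abbreviations for A's per-cluster computation
def clusterTexts (threat_texts : List String) (labels : List Int) (c : Int) : List String :=
  ((threat_texts.zip labels).filter (fun tl => tl.2 == c)).map Prod.fst

def vA (threat_texts : List String) (labels : List Int) (c : Int) : String :=
  (PySem.List.max? (clusterTexts threat_texts labels c) PySem.Str.len).getD ""

-- A's loop body off the noise test
def gA (threat_texts : List String) (labels : List Int)
    (representatives : PySem.Dict Int String) (cluster_id : Int) : PySem.Dict Int String :=
  match PySem.List.max? (clusterTexts threat_texts labels cluster_id) PySem.Str.len with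
  | some m => representatives.insert cluster_id m
  | none => representatives

theorem snd_zip (ts : List String) (ls : List Int) :
    (ts.zip ls).map Prod.snd = ls.take ts.length := by
  induction ts generalizing ls with
  | nil => simp
  | cons t ts ih => cases ls with
    | nil => simp
    | cons l ls => simp [ih]

-- a foldl whose step is the identity off p is a foldl over the filtered list
theorem foldl_filter_step {α σ : Type} (p : α → Bool) (g f : σ → α → σ)
    (hf : ∀ s a, f s a = if p a then g s a else s) :
    ∀ (l : List α) (s : σ), l.foldl f s = (l.filter p).foldl g s := by
  intro l
  induction l with
  | nil => intro s; rfl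
  | cons a l ih =>
    intro s
    by_cases hp : p a
    · simp [hp, hf s a, ih]
    · simp [hp, hf s a, ih]

theorem filter_ofList_aux (p : Int → Bool) :
    ∀ (l : List Int) (s : PySem.Set Int),
      (l.foldl PySem.Set.add s).filter p = (l.filter p).foldl PySem.Set.add (s.filter p) := by
  intro l
  induction l with
  | nil => intro s; rfl
  | cons x l ih =>
    intro s
    by_cases hp : p x
    · have hadd : (PySem.Set.add s x).filter p = PySem.Set.add (s.filter p) x := by
        by_cases hx : x ∈ s
        · have h1 : PySem.Set.add s x = s := by simp [PySem.Set.add, hx]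
          have h2 : PySem.Set.add (s.filter p) x = s.filter p := by
            simp [PySem.Set.add, List.mem_filter, hx, hp]
          rw [h1, h2]
        · have h1 : PySem.Set.add s x = s ++ [x] := by simp [PySem.Set.add, hx]
          have h2 : PySem.Set.add (s.filter p) x = s.filter p ++ [x] := by
            have : x ∉ s.filter p := fun h => hx (List.mem_of_mem_filter h)
            simp [PySem.Set.add, this]
          rw [h1, h2, List.filter_append]
          simp [hp]
      simp [hp, ih, hadd]
    · have hadd : (PySem.Set.add s x).filter p = s.filter p := by
        by_cases hx : x ∈ s
        · simp [PySem.Set.add, hx]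
        · simp [PySem.Set.add, hx, List.filter_append, hp]
      simp [hp, ih, hadd]

-- filtering commutes with first-occurrence dedup
theorem filter_ofList (p : Int → Bool) (l : List Int) :
    PySem.Set.ofList (l.filter p) = (PySem.Set.ofList l).filter p := by
  show _ = (l.foldl PySem.Set.add PySem.Set.empty).filter p
  rw [filter_ofList_aux]
  rfl

-- updating with elements that are filtered out or already present keeps the filtered set
theorem update_filter (p : Int → Bool) :
    ∀ (b : List Int) (s : PySem.Set Int), (∀ x ∈ b, p x = true → x ∈ s) →
      (PySem.Set.update s b).filter p = s.filter p := by
  intro b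
  induction b with
  | nil => intro s _; rfl
  | cons x b ih =>
    intro s hs
    show (PySem.Set.update (PySem.Set.add s x) b).filter p = s.filter p
    by_cases hx : x ∈ s
    · have h1 : PySem.Set.add s x = s := by simp [PySem.Set.add, hx]
      rw [h1]
      exact ih s (fun y hy hp => hs y (by simp [hy]) hp)
    · have hpx : p x = false := by
        by_contra h
        exact hx (hs x (by simp) (by simpa using h))
      have hadd : PySem.Set.add s x = s ++ [x] := by simp [PySem.Set.add, hx]
      rw [hadd, ih (s ++ [x]) (fun y hy hp =>
        List.mem_append_left _ (hs y (by simp [hy]) hp))]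
      simp [List.filter_append, hpx]

theorem filter_snd_comm (l : List (String × Int)) :
    (l.map Prod.snd).filter (fun c => c != -1)
      = (l.filter (fun tl => tl.2 != -1)).map Prod.snd := by
  induction l with
  | nil => rfl
  | cons x l ih => by_cases h : (x.2 != -1) = true <;> simp [h, ih]

-- B's keys: first occurrences, in order, of the non-noise labels of the zipped list
theorem alt_keys : ∀ (zs : List (String × Int)) (d : PySem.Dict Int String),
    (zs.foldl altStep d).keys
      = PySem.Set.update d.keys ((zs.filter (fun tl => tl.2 != -1)).map Prod.snd) := by
  intro zs
  induction zs with
  | nil => intro d; rfl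
  | cons tl zs ih =>
    intro d
    obtain ⟨t, l⟩ := tl
    by_cases hl : l = -1
    · simp only [List.foldl_cons, List.filter_cons]
      simp [altStep, hl, ih]
    · have hmem : l ∈ d.keys → PySem.Set.add d.keys l = d.keys := by
        intro h; simp [PySem.Set.add, h]
      have hne : ((l : Int) != -1) = true := by simpa using hl
      have hstep : (altStep d (t, l)).keys = PySem.Set.add d.keys l := by
        unfold altStep
        simp only [hl, if_false]
        cases hg : d.get? l with
        | none =>
          have hc : d.contains l = false := (PySem.Dict.get?_eq_none_iff_contains d l).mp hg
          have hnm : l ∉ d.keys := fun h => by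
            rw [(PySem.Dict.contains_iff_mem_keys d l).mpr h] at hc; cases hc
          rw [PySem.Dict.keys_insert_of_not_contains d t hc]
          simp [PySem.Set.add, hnm]
        | some cur =>
          have hc : d.contains l = true := by
            by_contra h
            have := (PySem.Dict.get?_eq_none_iff_contains d l).mpr (Bool.eq_false_iff.mpr h)
            rw [hg] at this; cases this
          have hk : l ∈ d.keys := (PySem.Dict.contains_iff_mem_keys d l).mp hc
          by_cases hlt : PySem.Str.len cur < PySem.Str.len t
          · simp only [hlt, if_pos]
            rw [PySem.Dict.keys_insert_of_contains d t hc, hmem hk]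
          · simp only [hlt, if_false]
            rw [hmem hk]
      simp only [List.foldl_cons, List.filter_cons, hne, if_pos, List.map_cons]
      rw [ih, hstep]
      rfl

-- B's lookup at a non-noise label is the running first-max over that label's cluster
theorem alt_get? : ∀ (zs : List (String × Int)) (d : PySem.Dict Int String) (c : Int), c ≠ -1 →
    (zs.foldl altStep d).get? c
      = ((zs.filter (fun tl => tl.2 == c)).map Prod.fst).foldl
          (fun acc x => match acc with
            | none => some x
            | some m => if PySem.Str.len m < PySem.Str.len x then some x else some m)
          (d.get? c) := by
  intro zs
  induction zs with
  | nil => intro d c _; rfl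
  | cons tl zs ih =>
    intro d c hc
    obtain ⟨t, l⟩ := tl
    simp only [List.foldl_cons, List.filter_cons]
    by_cases hlc : l = c
    · subst hlc
      have hbe : ((l : Int) == l) = true := by simp
      simp only [hbe, if_pos, List.map_cons, List.foldl_cons]
      rw [ih _ _ hc]
      have hstep : (altStep d (t, l)).get? l
          = match d.get? l with
            | none => some t
            | some m => if PySem.Str.len m < PySem.Str.len t then some t else some m := by
        unfold altStep
        simp only [hc, if_false]
        cases hg : d.get? l with
        | none => simp [PySem.Dict.get?_insert_self]
        | some cur =>
          by_cases hlt : PySem.Str.len cur < PySem.Str.len t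
          · simp only [hlt, if_pos]
            simp [PySem.Dict.get?_insert_self]
          · simp only [hlt, if_false]
            simp [hg]
      rw [hstep]
    · have hbe : ((l : Int) == c) = false := by simp [Ne.symm, hlc]
      simp only [hbe, Bool.false_eq_true, if_false]
      rw [ih _ _ hc]
      have hstep : (altStep d (t, l)).get? c = d.get? c := by
        unfold altStep
        by_cases hl : l = -1
        · simp [hl]
        · simp only [hl, if_false]
          have hne : c ≠ l := fun h => hlc h.symm
          cases hg : d.get? l with
          | none => rw [PySem.Dict.get?_insert_of_ne _ _ hne]
          | some cur =>
            by_cases hlt : PySem.Str.len cur < PySem.Str.len t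
            · simp only [hlt, if_pos]
              rw [PySem.Dict.get?_insert_of_ne _ _ hne]
            · simp only [hlt, if_false]
      rw [hstep]

-- every non-noise label of the deduplicated label list has a nonempty cluster (under Pre_)
theorem cluster_max_some (ts : List String) (ls : List Int)
    (hpre : Pre_get_cluster_representatives ts ls) (c : Int)
    (hmem : c ∈ ls) (hc : c ≠ -1) :
    ∃ m, PySem.List.max? (clusterTexts ts ls c) PySem.Str.len = some m := by
  have htake : c ∈ ls.take ts.length := by
    rw [← List.take_append_drop ts.length ls] at hmem
    rcases List.mem_append.mp hmem with h | h
    · exact h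
    · exact hpre c h hc
  have hzip : c ∈ (ts.zip ls).map Prod.snd := by rw [snd_zip]; exact htake
  rcases List.mem_map.mp hzip with ⟨tl, htl, hsnd⟩
  have hnonnil : clusterTexts ts ls c ≠ [] := by
    unfold clusterTexts
    simp only [ne_eq, List.map_eq_nil_iff, List.filter_eq_nil_iff]
    push Not
    exact ⟨tl, htl, by simp [hsnd]⟩
  cases hm : PySem.List.max? (clusterTexts ts ls c) PySem.Str.len with
  | none => exact absurd (((PySem.List.max?_eq_none_iff _ _).mp hm)) hnonnil
  | some m => exact ⟨m, rfl⟩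

-- A's fold, with the noise branch filtered away, inserts fresh distinct keys
theorem A_items (ts : List String) (ls : List Int)
    (hpre : Pre_get_cluster_representatives ts ls) :
    get_cluster_representatives ts ls
      = ((PySem.Set.ofList ls).filter (fun c => c != -1)).map (fun c => (c, vA ts ls c)) := by
  unfold get_cluster_representatives
  rw [foldl_filter_step (fun c => c != -1) (gA ts ls) (aStep ts ls)
    (by
      intro s a
      by_cases h : a = -1
      · simp [aStep, h]
      · simp [aStep, gA, clusterTexts, h])]
  rw [PySem.List.foldl_congr_mem _ _ (fun reps c => reps.insert c (vA ts ls c)) _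
    (by
      intro acc c hcmem
      rcases List.mem_filter.mp hcmem with ⟨hcs, hcp⟩
      have hc : c ≠ -1 := by simpa using hcp
      rcases cluster_max_some ts ls hpre c ((PySem.Set.mem_ofList _ _).mp hcs) hc with ⟨m, hm⟩
      simp [gA, hm, vA])]
  have hfresh := PySem.Dict.items_foldl_insert_fresh
    ((PySem.Set.ofList ls).filter (fun c => c != -1)) (fun a => a) (vA ts ls)
    (PySem.Dict.empty)
    (fun a _ => rfl)
    (by simpa using (PySem.Set.nodup_ofList (xs := ls)).filter (fun c => c != -1))
  simpa using hfresh

-- B returns the same association list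
theorem B_items (ts : List String) (ls : List Int)
    (hpre : Pre_get_cluster_representatives ts ls) :
    get_cluster_representatives_alt ts ls
      = ((PySem.Set.ofList ls).filter (fun c => c != -1)).map (fun c => (c, vA ts ls c)) := by
  unfold get_cluster_representatives_alt
  set D := (ts.zip ls).foldl altStep PySem.Dict.empty with hD
  have hkeys : D.keys = ((PySem.Set.ofList ls).filter (fun c => c != -1)) := by
    rw [hD, alt_keys]
    show PySem.Set.ofList (((ts.zip ls).filter (fun tl => tl.2 != -1)).map Prod.snd) = _
    rw [← filter_snd_comm, snd_zip, filter_ofList]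
    have hsplit : PySem.Set.ofList ls
        = PySem.Set.update (PySem.Set.ofList (ls.take ts.length)) (ls.drop ts.length) := by
      show ls.foldl PySem.Set.add PySem.Set.empty = _
      conv_lhs => rw [← List.take_append_drop ts.length ls]
      rw [List.foldl_append]
      rfl
    rw [hsplit, update_filter _ _ _
      (fun x hx hp => (PySem.Set.mem_ofList _ _).mpr (hpre x hx (by simpa using hp)))]
  have hnodup : D.keys.Nodup := by
    rw [hkeys]
    exact (PySem.Set.nodup_ofList (xs := ls)).filter _
  rw [PySem.Dict.items_eq_map_keys D hnodup "", hkeys]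
  apply List.map_congr_left
  intro c hcmem
  rcases List.mem_filter.mp hcmem with ⟨hcs, hcp⟩
  have hc : c ≠ -1 := by simpa using hcp
  have hget : D.get? c = PySem.List.max? (clusterTexts ts ls c) PySem.Str.len := by
    rw [hD, alt_get? _ _ _ hc]
    have h0 : (PySem.Dict.empty : PySem.Dict Int String).get? c = none := rfl
    rw [h0]
    simp only [PySem.List.max?, clusterTexts]
    apply PySem.List.foldl_congr_mem
    intro acc x _
    cases acc <;> rfl
  rcases cluster_max_some ts ls hpre c ((PySem.Set.mem_ofList _ _).mp hcs) hc with ⟨m, hm⟩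
  simp [PySem.Dict.getD, hget, hm, vA]

-- ===== VERDICT (by name: the statement is the Claim_ definition above) =====
theorem get_cluster_representatives_spec : Claim_equal_get_cluster_representatives := by
  unfold Claim_equal_get_cluster_representatives
  intro ts ls _ hpre
  unfold Spec_get_cluster_representatives
  rw [A_items ts ls hpre, B_items ts ls hpre]

theorem get_cluster_representatives_raises : Claim_raises_get_cluster_representatives := by
  unfold Claim_raises_get_cluster_representatives
  refine ⟨?_, by decide⟩
  intro ts ls _ hr hpre
  rcases hr with ⟨x, hx, hne, hnt⟩
  exact hnt (hpre x hx hne)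

-- self-check that the raise-witness output literal is B's value there (projection of the theorem above)
theorem pvRaiseWitnessOut_ok :
    get_cluster_representatives_alt (pvRaiseWitness_get_cluster_representatives.1)
        (pvRaiseWitness_get_cluster_representatives.2)
      = pvRaiseWitnessOut_get_cluster_representatives :=
  get_cluster_representatives_raises.2.2.2
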